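-- pv_equiv track=rewrite | github.com/CepbluKot/demo-control-plane | log_summarizer/utils/tokens.py | trim_rows_to_budget
-- ===== SOURCE A (Python) =====
-- def estimate_tokens(text: str) -> int:
--     """Грубая оценка числа токенов.
--
--     len(text) // 3 — консервативная оценка для логов с JSON,
--     трейсами, нелатинскими символами. Для чистого английского текста
--     правильнее // 4, но логи плотнее.
--     """
--     return max(len(text) // 3, 0)
--
-- def trim_rows_to_budget(rows: list[str], budget_tokens: int) -> list[str]:
--     """Берёт максимальный префикс строк, влезающий в бюджет токенов.
--
--     Никогда не обрезает строку на полуслове — берёт целые элементы.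
--     Строки, которые сами по себе превышают бюджет, пропускаются.
--     """
--     result: list[str] = []
--     used = 0
--     for row in rows:
--         row_tokens = estimate_tokens(row)
--         if used + row_tokens > budget_tokens:
--             break
--         result.append(row)
--         used += row_tokens
--     return result
-- ===== SOURCE B (Python) =====
-- def estimate_tokens(text: str) -> int:
--     return max(len(text) // 3, 0)
--
--
-- def trim_rows_to_budget(rows: list[str], budget_tokens: int) -> list[str]:
--     # Precompute prefix sums of token estimates, then BINARY-SEARCH the
--     # largest k with sums[k] <= budget_tokens.  Correct because token
--     # estimates are nonnegative, so the prefix sums are nondecreasing and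
--     # the break point of a linear scan is exactly the maximal fitting prefix.
--     sums = [0]
--     total = 0
--     for row in rows:
--         total += estimate_tokens(row)
--         sums.append(total)
--     lo, hi = 0, len(rows)
--     while lo < hi:
--         mid = (lo + hi + 1) // 2
--         if sums[mid] <= budget_tokens:
--             lo = mid
--         else:
--             hi = mid - 1
--     return rows[:lo]
-- ===== Notes on version B (the rewrite author's own statement) =====
-- stated objective: alternative
-- what changed: Replaces the single scan with mutable accumulator and early break by precomputing the prefix-sum table of token estimates and binary-searching it for the largest prefix whose total fits the budget, then slicing.
import Mathlib
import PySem

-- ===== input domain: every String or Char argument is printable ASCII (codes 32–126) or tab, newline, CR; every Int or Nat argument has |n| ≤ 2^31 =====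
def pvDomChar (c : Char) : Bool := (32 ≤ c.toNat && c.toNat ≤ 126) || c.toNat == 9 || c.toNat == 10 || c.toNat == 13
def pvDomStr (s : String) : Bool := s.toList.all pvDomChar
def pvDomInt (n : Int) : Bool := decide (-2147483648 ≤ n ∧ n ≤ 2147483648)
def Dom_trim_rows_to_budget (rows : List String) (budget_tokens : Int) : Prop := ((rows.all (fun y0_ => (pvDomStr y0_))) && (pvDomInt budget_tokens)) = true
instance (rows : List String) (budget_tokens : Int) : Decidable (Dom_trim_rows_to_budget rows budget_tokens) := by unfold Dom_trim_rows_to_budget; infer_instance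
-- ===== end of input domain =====

-- B replaces A's linear scan with accumulator and early break by a prefix-sum table
-- plus a binary search for the cutoff (alternative algorithm, same overall cost).

-- ===== PORT A =====
-- estimate_tokens(text) = max(len(text) // 3, 0)
def estimate_tokens (text : String) : Int :=
  max (PySem.Int.floordiv (PySem.Str.len text) 3) 0

-- A's for-loop with break, as structural recursion carrying `used`
def trimGo (rows : List String) (budget_tokens used : Int) : List String :=
  match rows with
  | [] => []
  | row :: rest =>
    let row_tokens := estimate_tokens row
    if used + row_tokens > budget_tokens then []
    else row :: trimGo rest budget_tokens (used + row_tokens)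

def trim_rows_to_budget (rows : List String) (budget_tokens : Int) : List String :=
  trimGo rows budget_tokens 0

-- ===== PORT B =====
-- B's first loop: builds the tail of the prefix-sum list (sums[1:]), carrying `total`
def sumsLoop (rows : List String) (total : Int) : List Int :=
  match rows with
  | [] => []
  | row :: rest =>
    (total + estimate_tokens row) :: sumsLoop rest (total + estimate_tokens row)

-- B's while-loop; Python's `mid` variable is inlined; sums[mid] is always in range,
-- so getD is exact here
def bsearch (sums : List Int) (b : Int) (lo hi : Nat) : Nat :=
  if _h : lo < hi then
    if sums.getD ((lo + hi + 1) / 2) 0 ≤ b then bsearch sums b ((lo + hi + 1) / 2) hi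
    else bsearch sums b lo ((lo + hi + 1) / 2 - 1)
  else lo
termination_by hi - lo
decreasing_by all_goals omega

def trim_rows_to_budget_alt (rows : List String) (budget_tokens : Int) : List String :=
  let sums := 0 :: sumsLoop rows 0
  rows.take (bsearch sums budget_tokens 0 rows.length)

-- ===== PRECONDITION & SPEC =====
def Spec_trim_rows_to_budget (rows : List String) (budget_tokens : Int) (out : List String) : Prop := out = trim_rows_to_budget_alt rows budget_tokens
instance (rows : List String) (budget_tokens : Int) (out : List String) : Decidable (Spec_trim_rows_to_budget rows budget_tokens out) := by unfold Spec_trim_rows_to_budget; infer_instance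

-- ===== CLAIM (what is proved, stated in full; the proofs are below) =====
def Claim_equal_trim_rows_to_budget : Prop := ∀ (rows : List String) (budget_tokens : Int), Dom_trim_rows_to_budget rows budget_tokens → Spec_trim_rows_to_budget rows budget_tokens (trim_rows_to_budget rows budget_tokens)

-- ===== LEMMAS AND PROOFS =====

theorem est_nonneg (r : String) : 0 ≤ estimate_tokens r := le_max_right _ _

theorem sumsLoop_length (rows : List String) (acc : Int) :
    (sumsLoop rows acc).length = rows.length := by
  induction rows generalizing acc with
  | nil => rfl
  | cons r rest ih => simp [sumsLoop, ih]

theorem sums_mono (rows : List String) (acc : Int) (k : Nat) (hk : k < rows.length) :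
    (acc :: sumsLoop rows acc).getD k 0 ≤ (acc :: sumsLoop rows acc).getD (k+1) 0 := by
  induction rows generalizing acc k with
  | nil => simp at hk
  | cons r rest ih =>
    cases k with
    | zero =>
      have h := est_nonneg r
      simp only [sumsLoop, List.getD_cons_zero, List.getD_cons_succ]
      omega
    | succ m =>
      have := ih (acc + estimate_tokens r) m (by simpa using Nat.lt_of_succ_lt_succ hk)
      simpa [sumsLoop, List.getD] using this

theorem sums_mono_le (rows : List String) (acc : Int) (k : Nat) (hk : k ≤ rows.length)
    (j : Nat) (hj : j ≤ k) :
    (acc :: sumsLoop rows acc).getD j 0 ≤ (acc :: sumsLoop rows acc).getD k 0 := by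
  induction k with
  | zero =>
    have hj0 : j = 0 := Nat.le_zero.mp hj
    subst hj0
    exact le_refl _
  | succ m ih =>
    by_cases hjm : j ≤ m
    · exact le_trans (ih (by omega) hjm) (sums_mono rows acc m (by omega))
    · have : j = m + 1 := by omega
      subst this; exact le_refl _

theorem takeWhile_getD (xs : List Int) (p : Int → Bool) (j : Nat)
    (hj : j < (xs.takeWhile p).length) : p (xs.getD j 0) = true := by
  induction xs generalizing j with
  | nil => simp [List.takeWhile] at hj
  | cons x rest ih =>
    by_cases hp : p x
    · cases j with
      | zero => simp [List.getD, hp]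
      | succ m =>
        simp only [List.takeWhile, hp, List.length_cons] at hj
        exact ih m (by omega)
    · simp [List.takeWhile, hp] at hj

theorem takeWhile_stop (xs : List Int) (p : Int → Bool)
    (h : (xs.takeWhile p).length < xs.length) :
    p (xs.getD (xs.takeWhile p).length 0) = false := by
  induction xs with
  | nil => simp at h
  | cons x rest ih =>
    by_cases hp : p x
    · have h' : (rest.takeWhile p).length < rest.length := by
        simp only [List.takeWhile, hp, List.length_cons] at h; omega
      simpa [List.takeWhile, hp, List.getD] using ih h'
    · simpa [List.takeWhile, hp, List.getD] using hp

theorem takeWhile_length_le (xs : List Int) (p : Int → Bool) :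
    (xs.takeWhile p).length ≤ xs.length := by
  induction xs with
  | nil => simp
  | cons x rest ih =>
    by_cases hp : p x
    · simp only [List.takeWhile, hp, List.length_cons]; omega
    · simp [List.takeWhile, hp]

theorem bsearch_spec (sums : List Int) (b : Int) (lo hi : Nat) (hlh : lo ≤ hi)
    (hdc : ∀ j k : Nat, lo ≤ j → j ≤ k → k ≤ hi → sums.getD k 0 ≤ b → sums.getD j 0 ≤ b) :
    lo ≤ bsearch sums b lo hi ∧ bsearch sums b lo hi ≤ hi ∧
    (bsearch sums b lo hi = lo ∨ sums.getD (bsearch sums b lo hi) 0 ≤ b) ∧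
    (∀ k : Nat, lo ≤ k → k ≤ hi → sums.getD k 0 ≤ b → k ≤ bsearch sums b lo hi) := by
  rw [bsearch]
  by_cases h : lo < hi
  · rw [dif_pos h]
    have hmid1 : lo < (lo + hi + 1) / 2 := by omega
    have hmid2 : (lo + hi + 1) / 2 ≤ hi := by omega
    by_cases hok : sums.getD ((lo + hi + 1) / 2) 0 ≤ b
    · rw [if_pos hok]
      have IH := bsearch_spec sums b ((lo + hi + 1) / 2) hi hmid2
        (fun j k hj hjk hk => hdc j k (by omega) hjk hk)
      obtain ⟨h1, h2, h3, h4⟩ := IH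
      refine ⟨by omega, h2, ?_, ?_⟩
      · right
        rcases h3 with h3 | h3
        · rw [h3]; exact hok
        · exact h3
      · intro k hk1 hk2 hokk
        by_cases hkm : (lo + hi + 1) / 2 ≤ k
        · exact h4 k hkm hk2 hokk
        · omega
    · rw [if_neg hok]
      have IH := bsearch_spec sums b lo ((lo + hi + 1) / 2 - 1) (by omega)
        (fun j k hj hjk hk => hdc j k hj hjk (by omega))
      obtain ⟨h1, h2, h3, h4⟩ := IH
      refine ⟨h1, by omega, h3, ?_⟩
      intro k hk1 hk2 hokk
      by_cases hkm : k ≤ (lo + hi + 1) / 2 - 1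
      · exact h4 k hk1 hkm hokk
      · exact absurd (hdc ((lo + hi + 1) / 2) k (by omega) (by omega) hk2 hokk) hok
  · rw [dif_neg h]
    exact ⟨le_refl _, by omega, Or.inl rfl, fun k hk1 hk2 _ => by omega⟩
termination_by hi - lo
decreasing_by all_goals omega

theorem trimGo_eq (rows : List String) (b used : Int) :
    trimGo rows b used =
      rows.take (((sumsLoop rows used).takeWhile (fun s => decide (s ≤ b))).length) := by
  induction rows generalizing used with
  | nil => simp [trimGo, sumsLoop]
  | cons row rest ih =>
    simp only [trimGo, sumsLoop, List.takeWhile]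
    by_cases h : used + estimate_tokens row > b
    · simp [not_le.mpr h]
    · simp [le_of_not_gt h, List.take_succ_cons, ih]

-- ===== VERDICT (by name: the statement is the Claim_ definition above) =====
theorem trim_rows_to_budget_spec : Claim_equal_trim_rows_to_budget := by
  intro rows b _
  unfold Spec_trim_rows_to_budget trim_rows_to_budget trim_rows_to_budget_alt
  rw [trimGo_eq]
  show _ = rows.take (bsearch (0 :: sumsLoop rows 0) b 0 rows.length)
  congr 1
  set sums := 0 :: sumsLoop rows 0 with hsums
  set L := ((sumsLoop rows 0).takeWhile (fun s => decide (s ≤ b))).length with hL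
  set n := rows.length with hn
  have hlen : (sumsLoop rows 0).length = n := sumsLoop_length rows 0
  have hLn : L ≤ n := by rw [hL, ← hlen]; exact takeWhile_length_le _ _
  have hdc : ∀ j k : Nat, 0 ≤ j → j ≤ k → k ≤ n → sums.getD k 0 ≤ b → sums.getD j 0 ≤ b :=
    fun j k _ hjk hk hok => le_trans (sums_mono_le rows 0 k hk j hjk) hok
  obtain ⟨h1, h2, h3, h4⟩ := bsearch_spec sums b 0 n (Nat.zero_le _) hdc
  set r := bsearch sums b 0 n with hr
  have hshift : ∀ j : Nat, sums.getD (j + 1) 0 = (sumsLoop rows 0).getD j 0 := fun j => rfl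
  have hrL : r ≤ L := by
    by_contra hc
    push Not at hc
    have hr1 : 1 ≤ r := by omega
    have hokr : sums.getD r 0 ≤ b := by
      rcases h3 with h3 | h3
      · omega
      · exact h3
    have hLlt : L < n := by omega
    have hstop := takeWhile_stop (sumsLoop rows 0) (fun s => decide (s ≤ b)) (by omega)
    have hokL1 : sums.getD (L + 1) 0 ≤ b := hdc (L + 1) r (by omega) (by omega) h2 hokr
    rw [hshift L] at hokL1
    simp only [decide_eq_false_iff_not] at hstop
    exact hstop hokL1
  have hLr : L ≤ r := by
    cases hL0 : L with
    | zero => omega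
    | succ m =>
      have hm : m < L := by omega
      have hget := takeWhile_getD (sumsLoop rows 0) (fun s => decide (s ≤ b)) m (by omega)
      simp only [decide_eq_true_eq] at hget
      have hokL : sums.getD L 0 ≤ b := by
        rw [hL0, hshift m]; exact hget
      have := h4 L (Nat.zero_le _) hLn hokL
      omega
  omega
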